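-- pv_equiv track=rewrite | github.com/bmazou/audio-recognition | redis_db.py | _score_potential_matches
-- ===== SOURCE A (Python) =====
-- from collections import defaultdict
--
-- def _score_potential_matches(potential_matches):
--     """
--     Scores potential matches based on time-difference alignment.
--     For each audio_id, it computes the score based on the number of aligned time differences.
--     If a potential match has consistent time differences, it is very likely a match.
--     """
--
--     match_scores = defaultdict(lambda: defaultdict(int))
--     final_scores = {}
--     for audio_id, time_pairs in potential_matches.items():
--         for db_time, query_time in time_pairs:
--             delta = db_time - query_time
--             match_scores[audio_id][delta] += 1
--
--
--         if match_scores[audio_id]:      # Some matches were found for audio_id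
--             best_delta = max(match_scores[audio_id], key=match_scores[audio_id].get)
--             final_scores[audio_id] = match_scores[audio_id][best_delta]
--         else:
--             final_scores[audio_id] = 0
--
--     return final_scores
-- ===== SOURCE B (Python) =====
-- def _score_potential_matches(potential_matches):
--     """Same scores, computed per audio_id by sorting the deltas and
--     measuring the longest run of equal consecutive deltas (the mode's
--     frequency), instead of hash-counting and an argmax pass."""
--     final_scores = {}
--     for audio_id, time_pairs in potential_matches.items():
--         deltas = sorted(db_time - query_time for db_time, query_time in time_pairs)
--         best = 0
--         cur = 0
--         prev = None
--         for d in deltas: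
--             cur = cur + 1 if prev == d else 1
--             prev = d
--             best = max(best, cur)
--         final_scores[audio_id] = best
--     return final_scores
-- ===== Notes on version B (the rewrite author's own statement) =====
-- stated objective: alternative
-- what changed: Per audio_id, B sorts the delta list and takes the longest run of equal consecutive deltas in one linear scan, instead of A's nested defaultdict counter followed by a max-by-get argmax pass over the counter's keys.
import Mathlib
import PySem

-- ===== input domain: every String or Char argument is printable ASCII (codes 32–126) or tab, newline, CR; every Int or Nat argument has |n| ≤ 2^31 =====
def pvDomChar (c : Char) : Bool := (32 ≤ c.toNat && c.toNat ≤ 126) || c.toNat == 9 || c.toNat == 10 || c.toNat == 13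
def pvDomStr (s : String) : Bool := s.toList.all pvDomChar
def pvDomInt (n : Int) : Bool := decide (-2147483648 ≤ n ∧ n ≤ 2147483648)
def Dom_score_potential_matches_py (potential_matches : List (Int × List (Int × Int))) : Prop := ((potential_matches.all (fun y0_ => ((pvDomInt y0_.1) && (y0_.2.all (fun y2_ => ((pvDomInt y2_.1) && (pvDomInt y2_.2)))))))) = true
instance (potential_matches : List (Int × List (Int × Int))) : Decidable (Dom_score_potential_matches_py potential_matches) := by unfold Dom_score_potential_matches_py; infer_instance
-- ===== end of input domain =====

-- B replaces A's nested defaultdict counter + max-by-get argmax with sort-the-deltas + longest-equal-run scan (alternative decomposition, same values).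

-- ===== PORT A =====
-- inner loop 'for db_time, query_time in time_pairs: match_scores[audio_id][delta] += 1'
def pvA_innerLoop (ms : PySem.Dict Int (PySem.Dict Int Int)) (audio_id : Int) (time_pairs : List (Int × Int)) : PySem.Dict Int (PySem.Dict Int Int) :=
  time_pairs.foldl (fun m p => m.modify audio_id PySem.Dict.empty (fun inner => inner.modify (p.1 - p.2) 0 (· + 1))) ms

-- one iteration of A's outer loop; state = (match_scores, final_scores)
def pvA_step (st : PySem.Dict Int (PySem.Dict Int Int) × PySem.Dict Int Int) (it : Int × List (Int × Int)) : PySem.Dict Int (PySem.Dict Int Int) × PySem.Dict Int Int :=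
  let ms := pvA_innerLoop st.1 it.1 it.2
  let inner := ms.getD it.1 PySem.Dict.empty         -- 'match_scores[audio_id]' (defaultdict read)
  let ms' := ms.setdefault it.1 PySem.Dict.empty     -- that defaultdict read creates the entry
  if inner.items ≠ [] then
    -- max(d, key=d.get): every key is present, so d.get k = d.getD k 0; max? is Python's first-maximal max
    match PySem.List.max? inner.keys (fun k => inner.getD k 0) with
    | some best_delta => (ms', st.2.insert it.1 (inner.getD best_delta 0))
    | none => (ms', st.2)  -- unreachable: inner.keys is nonempty in this branch
  else (ms', st.2.insert it.1 0)

def score_potential_matches_py (potential_matches : List (Int × List (Int × Int))) : List (Int × Int) :=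
  -- dict(potential_matches): duplicate keys collapse, later value wins (Python dict marshalling)
  (((PySem.Dict.ofList potential_matches).items.foldl pvA_step (PySem.Dict.empty, PySem.Dict.empty)).2).items

-- ===== PORT B =====
-- 'cur = cur + 1 if prev == d else 1; prev = d; best = max(best, cur)'; state = (best, cur, prev)
def pvB_scanStep (st : Int × Int × Option Int) (d : Int) : Int × Int × Option Int :=
  let cur := if st.2.2 = some d then st.2.1 + 1 else 1
  (max st.1 cur, cur, some d)

def pvB_best (deltas : List Int) : Int :=
  (deltas.foldl pvB_scanStep (0, 0, none)).1

def pvB_step (fs : PySem.Dict Int Int) (it : Int × List (Int × Int)) : PySem.Dict Int Int :=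
  fs.insert it.1 (pvB_best (PySem.List.sorted (it.2.map (fun p => p.1 - p.2)) (fun x => x) false))

def score_potential_matches_py_alt (potential_matches : List (Int × List (Int × Int))) : List (Int × Int) :=
  ((PySem.Dict.ofList potential_matches).items.foldl pvB_step PySem.Dict.empty).items

-- ===== PRECONDITION & SPEC =====
def Spec_score_potential_matches_py (potential_matches : List (Int × List (Int × Int))) (out : List (Int × Int)) : Prop := out = score_potential_matches_py_alt potential_matches
instance (potential_matches : List (Int × List (Int × Int))) (out : List (Int × Int)) : Decidable (Spec_score_potential_matches_py potential_matches out) := by unfold Spec_score_potential_matches_py; infer_instance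

-- ===== CLAIM (what is proved, stated in full; the proofs are below) =====
def Claim_equal_score_potential_matches_py : Prop := ∀ (potential_matches : List (Int × List (Int × Int))), Dom_score_potential_matches_py potential_matches → Spec_score_potential_matches_py potential_matches (score_potential_matches_py potential_matches)

-- ===== LEMMAS AND PROOFS =====

def pvCnt (l : List Int) (x : Int) : Int := (l.count x : Int)

-- the value B's scan is proved to compute: max over x of (count of x in m) + bonus c on p
def pvS (m l : List Int) (c p : Int) : Int :=
  l.foldl (fun a x => max a (pvCnt m x + if x = p then c else 0)) 0

-- M is the frequency of the mode of l
def pvMaxIs (l : List Int) (M : Int) : Prop :=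
  (∃ x ∈ l, pvCnt l x = M) ∧ (∀ x ∈ l, pvCnt l x ≤ M)

lemma pvCnt_nonneg (l : List Int) (x : Int) : 0 ≤ pvCnt l x := by
  simp [pvCnt]

lemma pvCnt_cons (d : Int) (t : List Int) (x : Int) :
    pvCnt (d :: t) x = pvCnt t x + (if x = d then 1 else 0) := by
  simp [pvCnt, List.count_cons]
  by_cases h : x = d <;> simp [h] <;> push_cast <;> omega

lemma pvCnt_pos_of_mem {t : List Int} {d : Int} (h : d ∈ t) : 1 ≤ pvCnt t d := by
  have := List.count_pos_iff.mpr h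
  simp only [pvCnt]
  omega

lemma pvCnt_eq_zero_of_not_mem {t : List Int} {d : Int} (h : d ∉ t) : pvCnt t d = 0 := by
  simp [pvCnt, List.count_eq_zero_of_not_mem h]

lemma pv_foldl_max_shift {α : Type} (f : α → Int) :
    ∀ (l : List α) (a b : Int),
      l.foldl (fun acc x => max acc (f x)) (max a b) = max a (l.foldl (fun acc x => max acc (f x)) b) := by
  intro l
  induction l with
  | nil => intro a b; simp
  | cons d t ih =>
    intro a b
    simp only [List.foldl_cons]
    rw [max_assoc, ih]

lemma pv_foldl_max_bound {α : Type} (f : α → Int) (l : List α) (i : Int) :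
    i ≤ l.foldl (fun acc x => max acc (f x)) i ∧ ∀ x ∈ l, f x ≤ l.foldl (fun acc x => max acc (f x)) i := by
  exact PySem.List.le_foldl_max_int l f i

lemma pv_foldl_max_cases {α : Type} (f : α → Int) (l : List α) (i : Int) :
    l.foldl (fun acc x => max acc (f x)) i = i ∨ ∃ x ∈ l, l.foldl (fun acc x => max acc (f x)) i = f x := by
  have h : l.foldl (fun acc x => max acc (f x)) i = (l.map f).foldl max i := by
    rw [List.foldl_map]
  rcases PySem.List.foldl_max_mem (l.map f) i with h0 | hm
  · left; rw [h, h0]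
  · right
    rw [h] at *
    rcases List.mem_map.mp hm with ⟨x, hx, hfx⟩
    exact ⟨x, hx, hfx.symm⟩

lemma pv_foldl_max_congr {α : Type} (f g : α → Int) :
    ∀ (l : List α) (i : Int), (∀ x ∈ l, f x = g x) →
      l.foldl (fun acc x => max acc (f x)) i = l.foldl (fun acc x => max acc (g x)) i := by
  intro l
  induction l with
  | nil => intro i _; rfl
  | cons d t ih =>
    intro i h
    simp only [List.foldl_cons]
    rw [h d (List.mem_cons_self ..), ih _ (fun x hx => h x (List.mem_cons_of_mem _ hx))]

lemma pvS_cons_self (d : Int) (t : List Int) (c : Int) (hc : 0 ≤ c) :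
    pvS (d :: t) (d :: t) c d = max (c + 1) (pvS t t (c + 1) d) := by
  unfold pvS
  rw [List.foldl_cons]
  rw [pv_foldl_max_congr (fun x => pvCnt (d :: t) x + if x = d then c else 0)
        (fun x => pvCnt t x + if x = d then c + 1 else 0) t _
        (by intro x hx
            simp only [pvCnt_cons]
            by_cases h : x = d <;> simp [h] <;> omega)]
  have hinit : (max 0 (pvCnt (d :: t) d + if d = d then c else 0)) = max (pvCnt t d + 1 + c) 0 := by
    rw [pvCnt_cons]
    have := pvCnt_nonneg t d
    simp
    omega
  rw [hinit, pv_foldl_max_shift]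
  have hb := (pv_foldl_max_bound (fun x => pvCnt t x + if x = d then c + 1 else 0) t 0).2
  by_cases hdt : d ∈ t
  · have h2 := pvCnt_pos_of_mem hdt
    have h1 := hb d hdt
    simp at h1
    omega
  · rw [pvCnt_eq_zero_of_not_mem hdt]
    omega

lemma pvS_cons_ne (d : Int) (t : List Int) (c p : Int) (hp : p ∉ d :: t) :
    pvS (d :: t) (d :: t) c p = max 1 (pvS t t 1 d) := by
  have hpd : p ≠ d := by intro h; exact hp (h ▸ List.mem_cons_self ..)
  have hpt : p ∉ t := fun h => hp (List.mem_cons_of_mem _ h)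
  unfold pvS
  rw [List.foldl_cons]
  rw [pv_foldl_max_congr (fun x => pvCnt (d :: t) x + if x = p then c else 0)
        (fun x => pvCnt t x + if x = d then 1 else 0) t _
        (by intro x hx
            simp only [pvCnt_cons]
            have hxp : x ≠ p := fun h => hpt (h ▸ hx)
            by_cases h : x = d <;> simp [h, hxp] <;> omega)]
  have hinit : (max 0 (pvCnt (d :: t) d + if d = p then c else 0)) = max (pvCnt t d + 1) 0 := by
    rw [pvCnt_cons]
    have := pvCnt_nonneg t d
    simp [Ne.symm hpd]
    omega
  rw [hinit, pv_foldl_max_shift]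
  have hb := (pv_foldl_max_bound (fun x => pvCnt t x + if x = d then 1 else 0) t 0).2
  by_cases hdt : d ∈ t
  · have h2 := pvCnt_pos_of_mem hdt
    have h1 := hb d hdt
    simp at h1
    omega
  · rw [pvCnt_eq_zero_of_not_mem hdt]
    omega

lemma pv_scan_inv :
    ∀ (l : List Int), l.Pairwise (· ≤ ·) → ∀ (b c p : Int), 0 ≤ b → 0 ≤ c → (∀ x ∈ l, p ≤ x) →
      (l.foldl pvB_scanStep (b, c, some p)).1 = max b (pvS l l c p) := by
  intro l
  induction l with
  | nil =>
    intro _ b c p hb hc _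
    simp only [List.foldl_nil]
    simp [pvS]
    omega
  | cons d t ih =>
    intro hs b c p hb hc hp
    obtain ⟨hd, ht⟩ := List.pairwise_cons.mp hs
    rw [List.foldl_cons]
    by_cases hpd : p = d
    · subst hpd
      have hstep : pvB_scanStep (b, c, some p) p = (max b (c + 1), c + 1, some p) := by
        simp [pvB_scanStep]
      rw [hstep, ih ht (max b (c + 1)) (c + 1) p (by omega) (by omega) hd,
          pvS_cons_self p t c hc]
      omega
    · have hstep : pvB_scanStep (b, c, some p) d = (max b 1, 1, some d) := by
        simp [pvB_scanStep, hpd]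
      have hplt : p < d := lt_of_le_of_ne (hp d (List.mem_cons_self ..)) hpd
      have hpnot : p ∉ d :: t := by
        intro hmem
        rcases List.mem_cons.mp hmem with h | h
        · exact hpd h
        · exact absurd (hd p h) (by omega)
      rw [hstep, ih ht (max b 1) 1 d (by omega) (by omega) hd, pvS_cons_ne d t c p hpnot]
      omega

lemma pvB_best_sorted_maxIs (s : List Int) (hs : s.Pairwise (· ≤ ·)) (hne : s ≠ []) :
    pvMaxIs s (pvB_best s) := by
  cases s with
  | nil => exact absurd rfl hne
  | cons d t =>
    obtain ⟨hd, ht⟩ := List.pairwise_cons.mp hs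
    have h1 : pvB_best (d :: t) = max 1 (pvS t t 1 d) := by
      unfold pvB_best
      rw [List.foldl_cons]
      have hstep : pvB_scanStep (0, 0, none) d = (1, 1, some d) := by simp [pvB_scanStep]
      rw [hstep, pv_scan_inv t ht 1 1 d (by omega) (by omega) hd]
    rw [h1]
    have hSdef : pvS t t 1 d = t.foldl (fun a x => max a (pvCnt t x + if x = d then 1 else 0)) 0 := rfl
    have hbnd := (pv_foldl_max_bound (fun x => pvCnt t x + if x = d then 1 else 0) t 0).2
    have hS0 : 0 ≤ pvS t t 1 d := by
      rw [hSdef]; exact (pv_foldl_max_bound (fun x => pvCnt t x + if x = d then 1 else 0) t 0).1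
    constructor
    · by_cases hS1 : pvS t t 1 d ≤ 1
      · have hcnt : pvCnt t d = 0 := by
          by_contra h
          have hpos : 1 ≤ pvCnt t d := by have := pvCnt_nonneg t d; omega
          have hmem : d ∈ t := by
            rw [← List.count_pos_iff]
            simp only [pvCnt] at hpos
            omega
          have h3 : pvCnt t d + 1 ≤ pvS t t 1 d := by
            have := hbnd d hmem
            rw [← hSdef] at this
            simpa using this
          omega
        refine ⟨d, List.mem_cons_self .., ?_⟩
        rw [pvCnt_cons, hcnt]
        simp
        omega
      · rcases pv_foldl_max_cases (fun x => pvCnt t x + if x = d then 1 else 0) t 0 with h0 | ⟨x, hx, hfx⟩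
        · rw [← hSdef] at h0; omega
        · rw [← hSdef] at hfx
          refine ⟨x, List.mem_cons_of_mem _ hx, ?_⟩
          rw [pvCnt_cons]
          by_cases hxd : x = d <;> simp [hxd] at hfx ⊢ <;> omega
    · intro x hx
      rcases List.mem_cons.mp hx with rfl | hxt
      · rw [pvCnt_cons]
        simp only [if_pos rfl]
        by_cases hdt : x ∈ t
        · have h3 : pvCnt t x + 1 ≤ pvS t t 1 x := by
            have := hbnd x hdt
            rw [← hSdef] at this
            simpa using this
          omega
        · rw [pvCnt_eq_zero_of_not_mem hdt]
          simp
      · have := hbnd x hxt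
        rw [← hSdef] at this
        rw [pvCnt_cons]
        by_cases hxd : x = d <;> simp [hxd] at this ⊢ <;> omega

lemma pvMaxIs_perm {l l' : List Int} (h : l.Perm l') {M : Int} (hM : pvMaxIs l M) : pvMaxIs l' M := by
  obtain ⟨⟨x, hx, hxM⟩, hb⟩ := hM
  have hcnt : ∀ y, pvCnt l y = pvCnt l' y := by
    intro y; simp [pvCnt, h.count_eq]
  exact ⟨⟨x, h.mem_iff.mp hx, (hcnt x) ▸ hxM⟩, fun y hy => (hcnt y) ▸ hb y (h.mem_iff.mpr hy)⟩

lemma pvMaxIs_unique {l : List Int} {M M' : Int} (h : pvMaxIs l M) (h' : pvMaxIs l M') : M = M' := by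
  obtain ⟨⟨x, hx, hxM⟩, hb⟩ := h
  obtain ⟨⟨y, hy, hyM⟩, hb'⟩ := h'
  have h1 := hb' x hx
  have h2 := hb y hy
  omega

lemma pvA_innerLoop_getD (id : Int) (tps : List (Int × Int)) :
    ∀ (ms : PySem.Dict Int (PySem.Dict Int Int)),
      (pvA_innerLoop ms id tps).getD id PySem.Dict.empty
        = tps.foldl (fun inner p => inner.modify (p.1 - p.2) 0 (· + 1)) (ms.getD id PySem.Dict.empty) := by
  induction tps with
  | nil => intro ms; rfl
  | cons p r ih =>
    intro ms
    rw [show pvA_innerLoop ms id (p :: r)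
          = pvA_innerLoop (ms.modify id PySem.Dict.empty (fun inner => inner.modify (p.1 - p.2) 0 (· + 1))) id r from rfl,
        ih, PySem.Dict.getD_modify_self, List.foldl_cons]

lemma pvA_innerLoop_contains (id : Int) (tps : List (Int × Int)) (k : Int) (hk : (k == id) = false) :
    ∀ (ms : PySem.Dict Int (PySem.Dict Int Int)),
      (pvA_innerLoop ms id tps).contains k = ms.contains k := by
  induction tps with
  | nil => intro ms; rfl
  | cons p r ih =>
    intro ms
    rw [show pvA_innerLoop ms id (p :: r)
          = pvA_innerLoop (ms.modify id PySem.Dict.empty (fun inner => inner.modify (p.1 - p.2) 0 (· + 1))) id r from rfl,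
        ih, PySem.Dict.contains_modify, hk]
    simp

lemma pvA_inner_counter {ms : PySem.Dict Int (PySem.Dict Int Int)} {id : Int}
    (h : ms.contains id = false) (tps : List (Int × Int)) :
    (pvA_innerLoop ms id tps).getD id PySem.Dict.empty
      = PySem.Dict.counter (tps.map (fun p => p.1 - p.2)) := by
  rw [pvA_innerLoop_getD, PySem.Dict.getD_of_not_contains ms PySem.Dict.empty h,
      PySem.Dict.counter_eq_foldl, List.foldl_map]

lemma pvA_score_maxIs {deltas : List Int} :
    ∀ {bd : Int}, PySem.List.max? (PySem.Dict.counter deltas).keys (fun k => (PySem.Dict.counter deltas).getD k 0) = some bd →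
      pvMaxIs deltas ((PySem.Dict.counter deltas).getD bd 0) := by
  intro bd hbd
  have hmem := PySem.List.max?_mem hbd
  have hmax := PySem.List.max?_isMax hbd
  rw [PySem.Dict.keys_counter] at hmem
  constructor
  · refine ⟨bd, ?_, ?_⟩
    · simpa [PySem.Set.mem_ofList] using hmem
    · simp [pvCnt, PySem.Dict.getD_counter]
  · intro x hx
    have hxk : x ∈ (PySem.Dict.counter deltas).keys := by
      rw [PySem.Dict.keys_counter]
      simpa [PySem.Set.mem_ofList] using hx
    have := hmax x hxk
    simpa [pvCnt, PySem.Dict.getD_counter] using this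

lemma pvA_step_eq (ms : PySem.Dict Int (PySem.Dict Int Int)) (fs : PySem.Dict Int Int)
    (it : Int × List (Int × Int)) (h : ms.contains it.1 = false) :
    pvA_step (ms, fs) it = ((pvA_innerLoop ms it.1 it.2).setdefault it.1 PySem.Dict.empty, pvB_step fs it) := by
  simp only [pvA_step, pvB_step]
  rw [pvA_inner_counter h it.2]
  by_cases hdl : it.2.map (fun p : Int × Int => p.1 - p.2) = []
  · rw [hdl]
    have hs0 : PySem.List.sorted ([] : List Int) (fun x => x) false = [] := by
      simp [PySem.List.sorted_eq_nil_iff]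
    simp [hs0]
    rfl
  · have hitems : (PySem.Dict.counter (it.2.map (fun p : Int × Int => p.1 - p.2))).items ≠ [] := by
      rw [PySem.Dict.items_counter]
      obtain ⟨y, hy⟩ := List.exists_mem_of_ne_nil _ hdl
      have : y ∈ PySem.Set.ofList (it.2.map (fun p : Int × Int => p.1 - p.2)) := by
        simpa [PySem.Set.mem_ofList] using hy
      intro hcon
      rw [List.map_eq_nil_iff] at hcon
      rw [hcon] at this
      simp at this
    have hkeys : (PySem.Dict.counter (it.2.map (fun p : Int × Int => p.1 - p.2))).keys ≠ [] := by
      intro hcon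
      apply hitems
      have : ((PySem.Dict.counter (it.2.map (fun p : Int × Int => p.1 - p.2))).items.map (·.1)) = [] := hcon
      exact List.map_eq_nil_iff.mp this
    rcases hmx : PySem.List.max? (PySem.Dict.counter (it.2.map (fun p : Int × Int => p.1 - p.2))).keys
        (fun k => (PySem.Dict.counter (it.2.map (fun p : Int × Int => p.1 - p.2))).getD k 0) with _ | bd
    · exact absurd ((PySem.List.max?_eq_none_iff _ _).mp hmx) hkeys
    · simp only [if_pos hitems]
      have hA := pvA_score_maxIs hmx
      have hsp : (PySem.List.sorted (it.2.map (fun p : Int × Int => p.1 - p.2)) (fun x => x) false).Pairwise (· ≤ ·) := by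
        simpa using PySem.List.sorted_pairwise (it.2.map (fun p : Int × Int => p.1 - p.2)) (fun x => x)
      have hsne : PySem.List.sorted (it.2.map (fun p : Int × Int => p.1 - p.2)) (fun x => x) false ≠ [] := by
        simpa [PySem.List.sorted_eq_nil_iff] using hdl
      have hB := pvMaxIs_perm (PySem.List.sorted_perm (it.2.map (fun p : Int × Int => p.1 - p.2)) (fun x => x) false)
        (pvB_best_sorted_maxIs _ hsp hsne)
      rw [pvMaxIs_unique hA hB]

lemma pv_outer :
    ∀ (its : List (Int × List (Int × Int))) (ms : PySem.Dict Int (PySem.Dict Int Int)) (fs : PySem.Dict Int Int),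
      (∀ it ∈ its, ms.contains it.1 = false) → (its.map (·.1)).Nodup →
      (its.foldl pvA_step (ms, fs)).2 = its.foldl pvB_step fs := by
  intro its
  induction its with
  | nil => intro ms fs _ _; rfl
  | cons it rest ih =>
    intro ms fs hfresh hnd
    simp only [List.foldl_cons]
    rw [pvA_step_eq ms fs it (hfresh it (List.mem_cons_self ..))]
    apply ih
    · intro it' h'
      have hmem' : it'.1 ∈ rest.map (·.1) := List.mem_map_of_mem h'
      have hne : (it'.1 == it.1) = false := by
        have hnotin := (List.nodup_cons.mp hnd).1
        simp only [beq_eq_false_iff_ne, ne_eq]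
        intro hcon
        rw [hcon] at hmem'
        exact hnotin hmem'
      rw [PySem.Dict.contains_setdefault, pvA_innerLoop_contains it.1 it.2 it'.1 hne,
          hfresh it' (List.mem_cons_of_mem _ h'), hne]
      simp
    · exact (List.nodup_cons.mp hnd).2

-- ===== VERDICT (by name: the statement is the Claim_ definition above) =====
theorem score_potential_matches_py_spec : Claim_equal_score_potential_matches_py := by
  intro pm _
  unfold Spec_score_potential_matches_py score_potential_matches_py score_potential_matches_py_alt
  rw [pv_outer _ _ _ (fun it _ => PySem.Dict.contains_empty it.1) (by
    have := PySem.Dict.nodup_keys_ofList pm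
    simpa [PySem.Dict.keys] using this)]
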